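-- pv_equiv track=rewrite | github.com/adhilahmmd/Web-Scanner | backend/scanners/auth_scanner.py | analyze_charset
-- ===== SOURCE A (Python) =====
-- import string
--
-- def analyze_charset(token: str) -> str:
--     """Describe the character set used in a token."""
--     has_upper = any(c in string.ascii_uppercase for c in token)
--     has_lower = any(c in string.ascii_lowercase for c in token)
--     has_digit = any(c in string.digits for c in token)
--     has_special = any(c in string.punctuation for c in token)
--     has_hex = all(c in string.hexdigits for c in token)
--
--     if has_hex and not has_special:
--         return "hexadecimal"
--     if has_upper and has_lower and has_digit and has_special:
--         return "alphanumeric+special (strong)"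
--     if has_upper and has_lower and has_digit:
--         return "alphanumeric (moderate)"
--     if has_digit and not has_upper and not has_lower:
--         return "numeric only (weak)"
--     if has_lower and not has_upper and not has_digit:
--         return "lowercase only (weak)"
--     return "mixed"
-- ===== SOURCE B (Python) =====
-- import string
--
-- def analyze_charset(token: str) -> str:
--     """Describe the character set used in a token."""
--     has_upper = has_lower = has_digit = has_special = False
--     has_hex = True
--     for c in token:
--         if c in string.ascii_uppercase:
--             has_upper = True
--         if c in string.ascii_lowercase:
--             has_lower = True
--         if c in string.digits:
--             has_digit = True
--         if c in string.punctuation: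
--             has_special = True
--         if c not in string.hexdigits:
--             has_hex = False
--
--     if has_hex and not has_special:
--         return "hexadecimal"
--     if has_upper and has_lower and has_digit and has_special:
--         return "alphanumeric+special (strong)"
--     if has_upper and has_lower and has_digit:
--         return "alphanumeric (moderate)"
--     if has_digit and not has_upper and not has_lower:
--         return "numeric only (weak)"
--     if has_lower and not has_upper and not has_digit:
--         return "lowercase only (weak)"
--     return "mixed"
-- ===== Notes on version B (the rewrite author's own statement) =====
-- stated objective: alternative
-- what changed: B replaces A's five independent full passes over the token (five any/all generator scans) by a single loop that carries all five flags in one accumulator, updating them per character.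
import Mathlib
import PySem

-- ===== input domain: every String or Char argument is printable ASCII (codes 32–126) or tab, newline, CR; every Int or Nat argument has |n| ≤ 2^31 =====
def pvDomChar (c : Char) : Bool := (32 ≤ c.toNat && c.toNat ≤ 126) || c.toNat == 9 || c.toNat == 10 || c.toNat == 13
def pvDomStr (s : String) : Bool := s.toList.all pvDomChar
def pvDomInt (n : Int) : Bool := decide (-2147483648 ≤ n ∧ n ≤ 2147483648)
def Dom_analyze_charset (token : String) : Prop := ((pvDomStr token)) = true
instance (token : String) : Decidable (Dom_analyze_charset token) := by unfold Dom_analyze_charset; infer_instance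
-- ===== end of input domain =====

-- B replaces A's five independent full scans of the token by one loop carrying all
-- five flags in a single accumulator (alternative decomposition, same cost class).

-- string.* constants (ASCII, exact)
def pyAsciiUppercase : List Char := "ABCDEFGHIJKLMNOPQRSTUVWXYZ".toList
def pyAsciiLowercase : List Char := "abcdefghijklmnopqrstuvwxyz".toList
def pyDigits : List Char := "0123456789".toList
def pyPunctuation : List Char := "!\"#$%&'()*+,-./:;<=>?@[\\]^_`{|}~".toList
def pyHexdigits : List Char := "0123456789abcdefABCDEF".toList

-- ===== PORT A =====
def analyze_charset (token : String) : String :=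
  let has_upper := token.toList.any (fun c => pyAsciiUppercase.contains c)
  let has_lower := token.toList.any (fun c => pyAsciiLowercase.contains c)
  let has_digit := token.toList.any (fun c => pyDigits.contains c)
  let has_special := token.toList.any (fun c => pyPunctuation.contains c)
  let has_hex := token.toList.all (fun c => pyHexdigits.contains c)
  if has_hex && !has_special then "hexadecimal"
  else if has_upper && has_lower && has_digit && has_special then "alphanumeric+special (strong)"
  else if has_upper && has_lower && has_digit then "alphanumeric (moderate)"
  else if has_digit && !has_upper && !has_lower then "numeric only (weak)"
  else if has_lower && !has_upper && !has_digit then "lowercase only (weak)"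
  else "mixed"

-- ===== PORT B =====
-- one step of B's loop: update the five flags for one character
def analyzeStep (acc : Bool × Bool × Bool × Bool × Bool) (c : Char) :
    Bool × Bool × Bool × Bool × Bool :=
  let u := if pyAsciiUppercase.contains c then true else acc.1
  let l := if pyAsciiLowercase.contains c then true else acc.2.1
  let d := if pyDigits.contains c then true else acc.2.2.1
  let s := if pyPunctuation.contains c then true else acc.2.2.2.1
  let h := if !(pyHexdigits.contains c) then false else acc.2.2.2.2
  (u, l, d, s, h)

def analyze_charset_alt (token : String) : String :=
  let flags := token.toList.foldl analyzeStep (false, false, false, false, true)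
  let has_upper := flags.1
  let has_lower := flags.2.1
  let has_digit := flags.2.2.1
  let has_special := flags.2.2.2.1
  let has_hex := flags.2.2.2.2
  if has_hex && !has_special then "hexadecimal"
  else if has_upper && has_lower && has_digit && has_special then "alphanumeric+special (strong)"
  else if has_upper && has_lower && has_digit then "alphanumeric (moderate)"
  else if has_digit && !has_upper && !has_lower then "numeric only (weak)"
  else if has_lower && !has_upper && !has_digit then "lowercase only (weak)"
  else "mixed"

-- ===== PRECONDITION & SPEC =====
def Spec_analyze_charset (token : String) (out : String) : Prop := out = analyze_charset_alt token
instance (token : String) (out : String) : Decidable (Spec_analyze_charset token out) := by unfold Spec_analyze_charset; infer_instance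

-- ===== CLAIM (what is proved, stated in full; the proofs are below) =====
def Claim_equal_analyze_charset : Prop := ∀ (token : String), Dom_analyze_charset token → Spec_analyze_charset token (analyze_charset token)

-- ===== LEMMAS AND PROOFS =====

-- the single fold computes exactly the five any/all flags of A
theorem foldl_analyzeStep (xs : List Char) (u l d s h : Bool) :
    xs.foldl analyzeStep (u, l, d, s, h) =
      (u || xs.any (fun c => pyAsciiUppercase.contains c),
       l || xs.any (fun c => pyAsciiLowercase.contains c),
       d || xs.any (fun c => pyDigits.contains c),
       s || xs.any (fun c => pyPunctuation.contains c),
       h && xs.all (fun c => pyHexdigits.contains c)) := by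
  induction xs generalizing u l d s h with
  | nil => simp
  | cons c cs ih =>
    simp only [List.foldl_cons, analyzeStep, List.any_cons, List.all_cons, ih]
    simp only [Prod.mk.injEq]
    refine ⟨by cases u <;> simp, by cases l <;> simp, by cases d <;> simp,
      by cases s <;> simp, by cases h <;> simp⟩

-- ===== VERDICT (by name: the statement is the Claim_ definition above) =====
theorem analyze_charset_spec : Claim_equal_analyze_charset := by
  intro token _
  unfold Spec_analyze_charset analyze_charset analyze_charset_alt
  simp only [foldl_analyzeStep, Bool.false_or, Bool.true_and]
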